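-- pv_equiv track=rewrite | github.com/joshz123/Interview_Prep_Questions | StudentHeight.py | solution
-- ===== SOURCE A (Python) =====
-- def smallIndex(array,num):
--     newlist = []
--     for i in array:
--         if num<i:
--             newlist.append(i)
--     try:
--         return array.index(max(newlist))
--     except:
--         return -1
--
-- def solution(A):
--     rows = []
--     for stud in A:
--         if len(rows)==0:
--             rows = [A[0]]
--             continue
--         replace = smallIndex(rows,stud)
--         if replace == -1:
--             rows.append(stud)
--         else:
--             rows[replace]=stud
--     return len(rows)
-- ===== SOURCE B (Python) =====
-- # B: keep the multiset of rows as a sorted (ascending) list: the max is rows[-1],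
-- # so the "any taller student" test and the replacement need no scan for the max.
-- def insert_sorted(xs, v):
--     i = 0
--     while i < len(xs) and xs[i] <= v:
--         i += 1
--     return xs[:i] + [v] + xs[i:]
--
-- def solution(A):
--     rows = []  # sorted ascending; same multiset as A's rows list
--     for stud in A:
--         if rows and rows[-1] > stud:
--             rows = insert_sorted(rows[:-1], stud)
--         else:
--             rows.append(stud)
--     return len(rows)
-- ===== Notes on version B (the rewrite author's own statement) =====
-- stated objective: faster
-- what changed: A rescans the whole rows list three times per student (filter, max, index) even when it only appends; B keeps rows sorted ascending so the max is the last element: the test is O(1) and only an actual replacement pays an ordered insertion.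
import Mathlib
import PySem

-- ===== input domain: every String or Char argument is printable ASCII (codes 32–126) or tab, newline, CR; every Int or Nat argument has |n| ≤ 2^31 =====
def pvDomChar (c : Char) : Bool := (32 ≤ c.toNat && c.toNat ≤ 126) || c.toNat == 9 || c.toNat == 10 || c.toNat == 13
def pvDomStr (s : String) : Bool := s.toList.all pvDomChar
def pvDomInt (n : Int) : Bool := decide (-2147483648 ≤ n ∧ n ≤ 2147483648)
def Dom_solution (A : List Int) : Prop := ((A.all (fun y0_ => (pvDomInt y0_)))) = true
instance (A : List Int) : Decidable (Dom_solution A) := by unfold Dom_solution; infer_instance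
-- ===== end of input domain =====

-- B keeps the multiset of rows sorted so the max is rows[-1]; same return value, no scans for the max.

-- ===== PORT A =====
def smallIndex (array : List Int) (num : Int) : Int :=
  -- newlist = []; for i in array: if num < i: newlist.append(i)
  let newlist := array.foldl (fun acc i => if num < i then acc ++ [i] else acc) []
  -- try: return array.index(max(newlist)) except: return -1
  -- max([]) raises ValueError -> except branch; index of a missing value would raise too
  match PySem.List.max? newlist (fun y => y) with
  | none => -1
  | some m =>
    match PySem.List.index? array m with
    | none => -1
    | some j => (j : Int)

def stepA (a0 : Int) (rows : List Int) (stud : Int) : List Int :=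
  if rows.length = 0 then [a0]  -- rows = [A[0]]; a0 is A[0] (the list is nonempty when the loop runs)
  else
    let replace := smallIndex rows stud
    if replace = -1 then rows ++ [stud]
    else rows.set replace.toNat stud  -- rows[replace] = stud; replace is a nonnegative index here

def solution (A : List Int) : Int :=
  ((A.foldl (stepA (A.headD 0)) []).length : Int)

-- ===== PORT B =====
-- insert_sorted: the while loop finds the first i with xs[i] > v, i.e. xs[:i] = takeWhile (≤ v),
-- xs[i:] = dropWhile (≤ v); exact.
def insertSorted (xs : List Int) (v : Int) : List Int :=
  xs.takeWhile (fun x => x ≤ v) ++ [v] ++ xs.dropWhile (fun x => x ≤ v)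

def stepB (rows : List Int) (stud : Int) : List Int :=
  match rows.getLast? with     -- 'if rows and rows[-1] > stud'
  | some last => if last > stud then insertSorted rows.dropLast stud else rows ++ [stud]
  | none => rows ++ [stud]

def solution_alt (A : List Int) : Int :=
  ((A.foldl stepB []).length : Int)

-- ===== PRECONDITION & SPEC =====
def Spec_solution (A : List Int) (out : Int) : Prop := out = solution_alt A
instance (A : List Int) (out : Int) : Decidable (Spec_solution A out) := by unfold Spec_solution; infer_instance

-- ===== CLAIM (what is proved, stated in full; the proofs are below) =====
def Claim_equal_solution : Prop := ∀ (A : List Int), Dom_solution A → Spec_solution A (solution A)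


-- ===== LEMMAS AND PROOFS =====

lemma insertSorted_perm (xs : List Int) (v : Int) : (insertSorted xs v).Perm (v :: xs) := by
  have h := @List.perm_middle _ v (xs.takeWhile (fun x => decide (x ≤ v))) (xs.dropWhile (fun x => decide (x ≤ v)))
  rw [List.takeWhile_append_dropWhile] at h
  simpa [insertSorted, List.append_assoc] using h

lemma insertSorted_sorted (xs : List Int) (v : Int) (h : xs.Pairwise (· ≤ ·)) :
    (insertSorted xs v).Pairwise (· ≤ ·) := by
  unfold insertSorted
  have hsplit : xs = xs.takeWhile (fun x => decide (x ≤ v)) ++ xs.dropWhile (fun x => decide (x ≤ v)) :=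
    (List.takeWhile_append_dropWhile).symm
  rw [hsplit] at h
  rw [List.pairwise_append] at h
  obtain ⟨ht, hd, hcross⟩ := h
  have htv : ∀ a ∈ xs.takeWhile (fun x => decide (x ≤ v)), a ≤ v := by
    intro a ha
    simpa using List.mem_takeWhile_imp ha
  have hvd : ∀ y ∈ xs.dropWhile (fun x => decide (x ≤ v)), v ≤ y := by
    intro y hy
    cases hdw : xs.dropWhile (fun x => decide (x ≤ v)) with
    | nil => simp [hdw] at hy
    | cons d ds =>
      have hdv : ¬ (d ≤ v) := by
        have := List.head_dropWhile_not (fun x => decide (x ≤ v)) (l := xs) (by simp [hdw])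
        simpa [hdw] using this
      rw [hdw] at hy hd
      rcases List.mem_cons.mp hy with rfl | hy'
      · omega
      · have : d ≤ y := (List.pairwise_cons.mp hd).1 y hy'
        omega
  rw [List.append_assoc, List.singleton_append, List.pairwise_append]
  refine ⟨ht, ?_, ?_⟩
  · rw [List.pairwise_cons]
    exact ⟨hvd, hd⟩
  · intro a ha b hb
    rcases List.mem_cons.mp hb with rfl | hb'
    · exact htv a ha
    · exact hcross a ha b hb'

lemma stepB_ne_nil (rows : List Int) (stud : Int) : stepB rows stud ≠ [] := by
  unfold stepB
  cases h : rows.getLast? with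
  | none => simp
  | some l =>
    by_cases hl : l > stud <;> simp [hl, insertSorted]

-- the last element of a sorted list bounds every element
lemma getLast_isMax (rb : List Int) (hb : rb ≠ []) (hs : rb.Pairwise (· ≤ ·)) :
    ∀ x ∈ rb, x ≤ rb.getLast hb := by
  intro x hx
  have hsplit : rb = rb.dropLast ++ [rb.getLast hb] := (List.dropLast_append_getLast hb).symm
  rw [hsplit] at hs hx
  rw [List.pairwise_append] at hs
  rcases List.mem_append.mp hx with hx' | hx'
  · exact hs.2.2 x hx' _ (by simp)
  · simp at hx'; omega

lemma step_inv (a0 stud : Int) (ra rb : List Int) (hne : ra ≠ [])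
    (hperm : ra.Perm rb) (hsorted : rb.Pairwise (· ≤ ·)) :
    (stepA a0 ra stud).Perm (stepB rb stud) ∧ (stepB rb stud).Pairwise (· ≤ ·) := by
  have hbne : rb ≠ [] := by intro h; rw [h] at hperm; exact hne hperm.eq_nil
  set l := rb.getLast hbne with hl_def
  have hlast : rb.getLast? = some l := List.getLast?_eq_some_getLast hbne
  have hmax : ∀ x ∈ rb, x ≤ l := getLast_isMax rb hbne hsorted
  have hAform : stepA a0 ra stud =
      (if (smallIndex ra stud) = -1 then ra ++ [stud] else ra.set (smallIndex ra stud).toNat stud) := by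
    unfold stepA
    have : ra.length ≠ 0 := fun h => hne (List.length_eq_zero_iff.mp h)
    simp [this]
  have hnewlist : (ra.foldl (fun acc i => if stud < i then acc ++ [i] else acc) []) =
      ra.filter (fun x => decide (stud < x)) := by
    simpa using PySem.List.foldl_append_ite_eq_filter (p := fun i => stud < i) (l := ra) (acc := [])
  by_cases hl : stud < l
  · -- some element of ra exceeds stud: A replaces the (first) max, B reinserts into dropLast
    have hlmem : l ∈ ra := hperm.mem_iff.mpr (List.getLast_mem hbne)
    -- the filtered list is nonempty and its max is l
    have hlf : l ∈ ra.filter (fun x => decide (stud < x)) := List.mem_filter.mpr ⟨hlmem, by simpa using hl⟩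
    obtain ⟨m, hm⟩ : ∃ m, PySem.List.max? (ra.filter (fun x => decide (stud < x))) (fun y => y) = some m := by
      cases hx : PySem.List.max? (ra.filter (fun x => decide (stud < x))) (fun y => y) with
      | none => rw [PySem.List.max?_eq_none_iff] at hx; rw [hx] at hlf; simp at hlf
      | some m => exact ⟨m, rfl⟩
    have hmmem : m ∈ ra.filter (fun x => decide (stud < x)) := PySem.List.max?_mem hm
    have hmra : m ∈ ra := (List.mem_filter.mp hmmem).1
    have hml : m = l := by
      have h1 : l ≤ m := PySem.List.max?_isMax hm l hlf
      have h2 : m ≤ l := hmax m (hperm.mem_iff.mp hmra)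
      omega
    obtain ⟨j, hj⟩ : ∃ j, PySem.List.index? ra m = some j := by
      cases hx : PySem.List.index? ra m with
      | none => rw [PySem.List.index?_eq_none_iff] at hx; exact absurd hmra hx
      | some j => exact ⟨j, rfl⟩
    obtain ⟨hjlt, hgetj, _⟩ := PySem.List.getElem_of_index?_eq_some hj
    have hsi : smallIndex ra stud = (j : Int) := by
      unfold smallIndex
      rw [hnewlist]
      simp only [hm, hj]
    have hA : stepA a0 ra stud = ra.set j stud := by
      rw [hAform, hsi]
      have : ((j : Int) = -1) = False := by simp
      simp [this]
    have hB : stepB rb stud = insertSorted rb.dropLast stud := by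
      unfold stepB
      rw [hlast]
      simp [hl]
    -- dropLast of rb is sorted
    have hdls : rb.dropLast.Pairwise (· ≤ ·) := hsorted.sublist (List.dropLast_sublist rb)
    constructor
    · -- perm chain
      have p1 : (ra.set j stud).Perm (stud :: ra.eraseIdx j) := List.set_perm_cons_eraseIdx hjlt stud
      have p2 : (ra[j] :: ra.eraseIdx j).Perm ra := List.getElem_cons_eraseIdx_perm hjlt
      have p3 : rb.Perm (l :: rb.dropLast) := by
        have h := List.perm_middle (a := l) (l₁ := rb.dropLast) (l₂ := ([] : List Int))
        rw [List.append_nil] at h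
        have e : rb.dropLast ++ [l] = rb := List.dropLast_append_getLast hbne
        conv_lhs => rw [← e]
        exact h
      rw [hgetj] at p2
      have pm : (m :: ra.eraseIdx j).Perm (l :: rb.dropLast) := (p2.trans hperm).trans p3
      rw [hml] at pm
      have p4 : (ra.eraseIdx j).Perm rb.dropLast := pm.cons_inv
      rw [hA, hB]
      exact p1.trans ((p4.cons stud).trans (insertSorted_perm _ _).symm)
    · rw [hB]
      exact insertSorted_sorted _ _ hdls
  · -- no element exceeds stud: both append
    have hnone : ∀ x ∈ ra, ¬ stud < x := by
      intro x hx hc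
      exact hl (lt_of_lt_of_le hc (hmax x (hperm.mem_iff.mp hx)))
    have hfe : ra.filter (fun x => decide (stud < x)) = [] := by
      rw [List.filter_eq_nil_iff]
      intro x hx
      simpa using hnone x hx
    have hsi : smallIndex ra stud = -1 := by
      unfold smallIndex
      rw [hnewlist, hfe]
      rfl
    have hA : stepA a0 ra stud = ra ++ [stud] := by rw [hAform, hsi]; simp
    have hB : stepB rb stud = rb ++ [stud] := by
      unfold stepB
      rw [hlast]
      simp [hl]
    refine ⟨by rw [hA, hB]; exact hperm.append_right [stud], ?_⟩
    rw [hB, List.pairwise_append]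
    refine ⟨hsorted, by simp, ?_⟩
    intro a ha b hb
    simp at hb
    subst hb
    have := hmax a ha
    omega

lemma fold_inv (l : List Int) (a0 : Int) : ∀ (ra rb : List Int), ra ≠ [] → ra.Perm rb →
    rb.Pairwise (· ≤ ·) → (l.foldl (stepA a0) ra).Perm (l.foldl stepB rb) := by
  induction l with
  | nil => intro ra rb _ hp _; simpa using hp
  | cons x t ih =>
    intro ra rb hne hp hs
    obtain ⟨hp', hs'⟩ := step_inv a0 x ra rb hne hp hs
    have hne' : stepA a0 ra x ≠ [] := by
      intro h
      rw [h] at hp'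
      exact stepB_ne_nil rb x hp'.symm.eq_nil
    simpa using ih (stepA a0 ra x) (stepB rb x) hne' hp' hs'

-- ===== VERDICT (by name: the statement is the Claim_ definition above) =====
theorem solution_spec : Claim_equal_solution := by
  intro A _
  unfold Spec_solution solution solution_alt
  cases A with
  | nil => rfl
  | cons a t =>
    have h1 : stepA ((a :: t).headD 0) [] a = [a] := by simp [stepA]
    have h2 : stepB [] a = [a] := by simp [stepB]
    have hp := fold_inv t ((a :: t).headD 0) [a] [a] (by simp) (List.Perm.refl _) (by simp)
    rw [List.foldl_cons, List.foldl_cons, h1, h2]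
    exact_mod_cast hp.length_eq
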